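-- pv_equiv track=rewrite | github.com/ffsbeltrao/mastermind-game | game.py | getTips
-- ===== SOURCE A (Python) =====
-- PASSWORD = ['1', '2', '3', '4']
--
-- def getTips(attempt):
--     tips = []
--     for position, pin in enumerate(attempt):
--         if pin in PASSWORD:
--             if position == PASSWORD.index(pin):
--                 tips.append('*')
--             else:
--                 tips.append('-')
--         else:
--             tips.append(" ")
--     return sorted(tips)
-- ===== SOURCE B (Python) =====
-- PASSWORD = ['1', '2', '3', '4']
--
-- def getTips(attempt):
--     stars = sum(1 for pin, sec in zip(attempt, PASSWORD) if pin == sec)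
--     in_pw = sum(attempt.count(sec) for sec in PASSWORD)
--     return [' '] * (len(attempt) - in_pw) + ['*'] * stars + ['-'] * (in_pw - stars)
-- ===== Notes on version B (the rewrite author's own statement) =====
-- stated objective: alternative
-- what changed: Replaces building a per-pin symbol list and comparison-sorting it with counting the three symbol classes (exact matches via zip with PASSWORD, in-password pins via per-symbol count) and emitting the sorted result directly as replicated runs ' '*blanks + '*'*stars + '-'*dashes.
import Mathlib
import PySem

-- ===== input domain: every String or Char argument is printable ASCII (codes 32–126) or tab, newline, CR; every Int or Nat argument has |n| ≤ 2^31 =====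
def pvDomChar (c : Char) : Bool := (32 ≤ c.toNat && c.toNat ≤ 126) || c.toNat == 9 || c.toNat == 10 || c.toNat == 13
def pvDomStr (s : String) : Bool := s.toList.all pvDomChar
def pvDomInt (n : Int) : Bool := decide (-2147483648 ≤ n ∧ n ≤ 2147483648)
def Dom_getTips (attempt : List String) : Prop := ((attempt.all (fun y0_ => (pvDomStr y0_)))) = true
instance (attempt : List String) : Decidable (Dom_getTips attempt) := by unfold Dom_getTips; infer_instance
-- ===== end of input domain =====

-- B replaces A's build-then-comparison-sort by counting the three symbol classes and
-- emitting the sorted result directly as replicated runs (a counting sort).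

def PASSWORD : List String := ["1", "2", "3", "4"]

-- ===== PORT A =====
def getTips (attempt : List String) : List String :=
  let tips := (PySem.List.enumerate attempt).foldl
    (fun tips pp =>
      if pp.2 ∈ PASSWORD then
        if (PySem.List.index? PASSWORD pp.2).map (fun k => (k : Int)) = some pp.1 then
          tips ++ ["*"]
        else
          tips ++ ["-"]
      else
        tips ++ [" "]) []
  PySem.List.sorted tips (fun x => x) false

-- ===== PORT B =====
def getTips_alt (attempt : List String) : List String :=
  let stars := List.countP (fun p => p.1 == p.2) (attempt.zip PASSWORD)
  let inPw := (PASSWORD.map (fun sec => attempt.count sec)).sum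
  List.replicate (attempt.length - inPw) " " ++
    List.replicate stars "*" ++ List.replicate (inPw - stars) "-"

-- ===== PRECONDITION & SPEC =====
def Spec_getTips (attempt : List String) (out : List String) : Prop := out = getTips_alt attempt
instance (attempt : List String) (out : List String) : Decidable (Spec_getTips attempt out) := by unfold Spec_getTips; infer_instance

-- ===== CLAIM (what is proved, stated in full; the proofs are below) =====
def Claim_equal_getTips : Prop := ∀ (attempt : List String), Dom_getTips attempt → Spec_getTips attempt (getTips attempt)

-- ===== LEMMAS AND PROOFS =====

-- the symbol A appends for one enumerated pin
def pvTip (pp : Int × String) : String :=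
  if pp.2 ∈ PASSWORD then
    if (PySem.List.index? PASSWORD pp.2).map (fun k => (k : Int)) = some pp.1 then "*" else "-"
  else " "

theorem pvFoldA (l : List (Int × String)) (acc : List String) :
    l.foldl
      (fun tips pp =>
        if pp.2 ∈ PASSWORD then
          if (PySem.List.index? PASSWORD pp.2).map (fun k => (k : Int)) = some pp.1 then
            tips ++ ["*"]
          else
            tips ++ ["-"]
        else
          tips ++ [" "]) acc = acc ++ l.map pvTip := by
  induction l generalizing acc with
  | nil => simp
  | cons p l ih =>
      simp only [List.foldl_cons, List.map_cons, ih, pvTip]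
      split_ifs <;> simp

theorem pvTip_cases (pp : Int × String) : pvTip pp = " " ∨ pvTip pp = "*" ∨ pvTip pp = "-" := by
  unfold pvTip; split_ifs <;> simp

theorem pvCountSpace (l : List String) (s : Int) :
    List.count " " ((PySem.List.enumerate l s).map pvTip)
      = List.countP (fun pin => !decide (pin ∈ PASSWORD)) l := by
  induction l generalizing s with
  | nil => simp [PySem.List.enumerate_nil]
  | cons x l ih =>
      simp only [PySem.List.enumerate_cons, List.map_cons, List.count_cons, List.countP_cons,
        ih]
      by_cases h : x ∈ PASSWORD
      · have : pvTip (s, x) ≠ " " := by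
          unfold pvTip; simp only [h, if_true]; split_ifs <;> decide
        simp [h, this]
      · have : pvTip (s, x) = " " := by unfold pvTip; simp [h]
        simp [h, this]

theorem pvTip_star_iff (n : Nat) (x : String) :
    (pvTip ((n : Int), x) = "*") ↔ PASSWORD[n]? = some x := by
  by_cases hx : x ∈ PASSWORD
  · fin_cases hx <;>
      rcases n with _|_|_|_|n <;>
        simp [pvTip, PASSWORD, PySem.List.index?, List.idxOf?, List.findIdx?,
          List.findIdx?.go] <;> omega
  · have h1 : pvTip ((n : Int), x) = " " := by simp [pvTip, hx]
    rw [h1]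
    constructor
    · intro h; exact absurd h (by decide)
    · intro h; exact absurd (List.mem_of_getElem? h) hx

theorem pvCountStar (l : List String) (n : Nat) :
    List.count "*" ((PySem.List.enumerate l (n : Int)).map pvTip)
      = List.countP (fun p => p.1 == p.2) (l.zip (PASSWORD.drop n)) := by
  induction l generalizing n with
  | nil => simp [PySem.List.enumerate_nil]
  | cons x l ih =>
      have hcast : ((n : Int) + 1) = ((n + 1 : Nat) : Int) := by push_cast; ring
      rw [PySem.List.enumerate_cons, List.map_cons, List.count_cons, hcast, ih]
      rcases h4 : PASSWORD.drop n with _ | ⟨c, rest⟩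
      · have hn : PASSWORD.length ≤ n := List.drop_eq_nil_iff.mp h4
        have hnone : PASSWORD[n]? = none := List.getElem?_eq_none hn
        have hne : ¬ (pvTip ((n : Int), x) = "*") := by
          rw [pvTip_star_iff, hnone]; simp
        have h5 : PASSWORD.drop (n + 1) = [] :=
          List.drop_eq_nil_iff.mpr (by omega)
        simp [h5, hne]
      · have hget : PASSWORD[n]? = some c := by
          have h0 : (PASSWORD.drop n)[0]? = some c := by rw [h4]; rfl
          rw [List.getElem?_drop] at h0
          simpa using h0
        have hrest : PASSWORD.drop (n + 1) = rest := by
          have hdd : PASSWORD.drop (n + 1) = (PASSWORD.drop n).drop 1 := by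
            rw [List.drop_drop]
          rw [hdd, h4]; rfl
        have hiff : (pvTip ((n : Int), x) = "*") ↔ x = c := by
          rw [pvTip_star_iff, hget]
          exact ⟨fun h => (Option.some.inj h).symm, fun h => by rw [h]⟩
        rw [List.zip_cons_cons, List.countP_cons, hrest]
        by_cases hxc : x = c
        · subst hxc
          have h1 : pvTip ((n : Int), x) = "*" := hiff.mpr rfl
          simp [h1]
        · have h1 : ¬ (pvTip ((n : Int), x) = "*") := fun h => hxc (hiff.mp h)
          simp [h1, hxc]

theorem pvCountSum (l : List String)
    (h : ∀ x ∈ l, x = " " ∨ x = "*" ∨ x = "-") :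
    List.count " " l + List.count "*" l + List.count "-" l = l.length := by
  induction l with
  | nil => simp
  | cons x l ih =>
      have hx := h x (by simp)
      have ih' := ih (fun y hy => h y (by simp [hy]))
      rcases hx with h1 | h1 | h1 <;> subst h1 <;>
        simp <;> omega

theorem pvPerm (l : List String) (b s d : Nat)
    (hall : ∀ x ∈ l, x = " " ∨ x = "*" ∨ x = "-")
    (hb : List.count " " l = b) (hs : List.count "*" l = s) (hd : List.count "-" l = d) :
    (List.replicate b " " ++ List.replicate s "*" ++ List.replicate d "-").Perm l := by
  rw [List.perm_iff_count]
  intro a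
  by_cases ha : a = " " ∨ a = "*" ∨ a = "-"
  · rcases ha with h1 | h1 | h1 <;> subst h1 <;>
      simp [List.count_append, List.count_replicate, hb, hs, hd]
  · push Not at ha
    have h0 : List.count a l = 0 := by
      rw [List.count_eq_zero]
      intro hmem
      rcases hall a hmem with h1 | h1 | h1 <;> simp [h1] at ha
    simp [List.count_append, List.count_replicate, h0]
    constructor <;> [skip; constructor] <;> intro hEq <;>
      exact absurd hEq.symm (by tauto)

theorem pvInPw (l : List String) :
    (PASSWORD.map (fun sec => l.count sec)).sum
      = List.countP (fun pin => decide (pin ∈ PASSWORD)) l := by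
  induction l with
  | nil => simp
  | cons x l ih =>
      rw [List.countP_cons]
      by_cases h : x ∈ PASSWORD
      · have hx : decide (x ∈ PASSWORD) = true := by simpa using h
        rw [hx, ← ih]
        fin_cases h <;> simp [PASSWORD, List.count_cons] <;> omega
      · have hx : decide (x ∈ PASSWORD) = false := by simpa using h
        rw [hx, ← ih]
        have h1 : x ≠ "1" := fun e => h (by rw [e]; decide)
        have h2 : x ≠ "2" := fun e => h (by rw [e]; decide)
        have h3 : x ≠ "3" := fun e => h (by rw [e]; decide)
        have h4 : x ≠ "4" := fun e => h (by rw [e]; decide)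
        simp [PASSWORD, List.count_cons, h1, h2, h3, h4]

theorem pvPairwise (b s d : Nat) :
    (List.replicate b " " ++ List.replicate s "*" ++ List.replicate d "-").Pairwise
      (fun a c => a ≤ c) := by
  have h1 : (" " : String) ≤ "*" := by rw [String.le_iff_toList_le]; decide
  have h2 : (" " : String) ≤ "-" := by rw [String.le_iff_toList_le]; decide
  have h3 : ("*" : String) ≤ "-" := by rw [String.le_iff_toList_le]; decide
  simp only [List.pairwise_append, List.pairwise_replicate, List.mem_replicate,
    List.mem_append]
  refine ⟨⟨Or.inr le_rfl, Or.inr le_rfl, ?_⟩, Or.inr le_rfl, ?_⟩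
  · rintro a ⟨-, rfl⟩ c ⟨-, rfl⟩; exact h1
  · rintro a (⟨-, rfl⟩ | ⟨-, rfl⟩) c ⟨-, rfl⟩
    · exact h2
    · exact h3

-- ===== VERDICT (by name: the statement is the Claim_ definition above) =====
theorem getTips_spec : Claim_equal_getTips := by
  intro attempt _
  unfold Spec_getTips getTips getTips_alt
  rw [pvFoldA, List.nil_append]
  have h0 : PySem.List.enumerate attempt = PySem.List.enumerate attempt ((0 : Nat) : Int) := by
    norm_num
  rw [h0]
  have hall : ∀ x ∈ (PySem.List.enumerate attempt ((0 : Nat) : Int)).map pvTip,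
      x = " " ∨ x = "*" ∨ x = "-" := by
    intro x hx
    rcases List.mem_map.mp hx with ⟨pp, -, rfl⟩
    exact pvTip_cases pp
  have hsum := pvCountSum _ hall
  have hlen : ((PySem.List.enumerate attempt ((0 : Nat) : Int)).map pvTip).length
      = attempt.length := by
    simp [PySem.List.length_enumerate]
  have hspace := pvCountSpace attempt ((0 : Nat) : Int)
  have hstar := pvCountStar attempt 0
  rw [List.drop_zero] at hstar
  have hsplit := List.length_eq_countP_add_countP
    (p := fun pin => decide (pin ∈ PASSWORD)) (l := attempt)
  simp only [decide_eq_true_eq, decide_not] at hsplit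
  have hinpw := pvInPw attempt
  exact PySem.List.sorted_id_eq_of_perm_of_pairwise _ _
    (pvPerm _ _ _ _ hall (by omega) hstar (by omega)) (pvPairwise _ _ _)
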